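-- pv_equiv track=rewrite | github.com/TomBenRu/advent_of_code_2025 | day_11/solve_part_2.py | get_reachable_subgraph
-- ===== SOURCE A (Python) =====
-- from collections import defaultdict, deque
--
-- def get_reachable_subgraph(graph: dict[str, list[str]], start: str, end: str) -> set[str]:
--     """Findet alle Knoten, die von start erreichbar sind UND end erreichen können."""
--     # Vorwärts-BFS: Was ist von start erreichbar?
--     forward_reachable = set()
--     queue = deque([start])
--     while queue:
--         node = queue.popleft()
--         if node in forward_reachable:
--             continue
--         forward_reachable.add(node)
--         for neighbor in graph.get(node, []):
--             queue.append(neighbor)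
--
--     # Rückwärts-Graph bauen
--     reverse_graph = defaultdict(list)
--     for node, neighbors in graph.items():
--         for neighbor in neighbors:
--             reverse_graph[neighbor].append(node)
--
--     # Rückwärts-BFS: Was kann end erreichen?
--     backward_reachable = set()
--     queue = deque([end])
--     while queue:
--         node = queue.popleft()
--         if node in backward_reachable:
--             continue
--         backward_reachable.add(node)
--         for neighbor in reverse_graph.get(node, []):
--             queue.append(neighbor)
--
--     # Schnittmenge: Knoten auf gültigen Pfaden
--     return forward_reachable & backward_reachable
-- ===== SOURCE B (Python) =====
-- from collections import deque
--
-- def get_reachable_subgraph(graph: dict[str, list[str]], start: str, end: str) -> set[str]: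
--     """Findet alle Knoten, die von start erreichbar sind UND end erreichen können."""
--     # Vorwärts-BFS: Was ist von start erreichbar?
--     forward = set()
--     queue = deque([start])
--     while queue:
--         node = queue.popleft()
--         if node in forward:
--             continue
--         forward.add(node)
--         for neighbor in graph.get(node, []):
--             queue.append(neighbor)
--
--     # Rückwärts-Hälfte ohne Umkehr-Graph: Fixpunkt über dem Original-Graphen.
--     # Ein Knoten erreicht end, wenn er end ist oder ein Nachfolger end erreicht.
--     reach = {end}
--     changed = True
--     while changed:
--         changed = False
--         for node, neighbors in graph.items():
--             if node not in reach and any(nb in reach for nb in neighbors):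
--                 reach.add(node)
--                 changed = True
--
--     return {n for n in forward if n in reach}
-- ===== Notes on version B (the rewrite author's own statement) =====
-- stated objective: alternative
-- what changed: A builds an explicit reverse adjacency graph and runs a second (backward) BFS from end; B never builds a reverse graph: it computes the set of nodes that can reach end as an iterative fixpoint closure over the original graph (repeat passes over graph.items() adding any node with a neighbor already in the set until nothing changes), then intersects it with the forward-reachable set.
import Mathlib
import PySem

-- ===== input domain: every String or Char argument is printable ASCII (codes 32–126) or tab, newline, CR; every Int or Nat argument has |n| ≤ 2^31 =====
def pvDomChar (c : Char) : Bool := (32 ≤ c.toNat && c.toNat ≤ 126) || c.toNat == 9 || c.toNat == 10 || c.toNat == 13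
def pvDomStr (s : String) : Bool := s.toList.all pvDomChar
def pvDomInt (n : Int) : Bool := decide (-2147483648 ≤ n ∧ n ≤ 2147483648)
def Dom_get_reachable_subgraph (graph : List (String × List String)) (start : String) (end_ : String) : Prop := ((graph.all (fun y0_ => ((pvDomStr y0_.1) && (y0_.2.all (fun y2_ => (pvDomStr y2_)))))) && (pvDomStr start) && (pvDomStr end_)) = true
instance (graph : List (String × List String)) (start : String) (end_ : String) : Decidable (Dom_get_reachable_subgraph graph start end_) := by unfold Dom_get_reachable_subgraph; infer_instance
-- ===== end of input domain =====

-- B replaces A's reverse-graph construction + backward BFS by a fixpoint closure computed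
-- directly over the original graph (no reverse adjacency structure); objective: alternative.

-- ===== PORT A =====
-- the BFS loop 'while queue: node = popleft(); if node in vis: continue; vis.add(node); enqueue adj(node)'
-- (the same loop text occurs for A's forward BFS, A's backward BFS and B's forward BFS);
-- the fuel argument is only a totality guard: each call is made with provably enough fuel to drain the queue
def pvBFS (adj : String → List String) : Nat → List String → PySem.Set String → PySem.Set String
  | 0, _, vis => vis
  | _ + 1, [], vis => vis
  | f + 1, q :: qs, vis =>
      if PySem.Set.contains vis q then pvBFS adj f qs vis
      else pvBFS adj f (qs ++ adj q) (PySem.Set.add vis q)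

-- 'reverse_graph = defaultdict(list); for node, neighbors in graph.items(): for neighbor in neighbors: reverse_graph[neighbor].append(node)'
def pvRev (items : List (String × List String)) : PySem.Dict String (List String) :=
  items.foldl (fun d p => p.2.foldl (fun d nb => d.modify nb [] (fun l => l ++ [p.1])) d) PySem.Dict.empty

def get_reachable_subgraph (graph : List (String × List String)) (start : String) (end_ : String) : List String :=
  let g := PySem.Dict.ofList graph
  let forward := pvBFS (fun u => g.getD u []) (1 + (g.items.map (fun p => p.2.length)).sum) [start] PySem.Set.empty
  let rev := pvRev g.items
  let backward := pvBFS (fun u => rev.getD u []) (1 + (rev.values.map List.length).sum) [end_] PySem.Set.empty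
  PySem.Set.inter forward backward

-- ===== PORT B =====
-- one item step of B's fixpoint pass: 'if node not in reach and any(nb in reach for nb in neighbors): reach.add(node); changed = True'
def pvPassStep (rc : PySem.Set String × Bool) (p : String × List String) : PySem.Set String × Bool :=
  if !(PySem.Set.contains rc.1 p.1) && p.2.any (fun nb => PySem.Set.contains rc.1 nb) then
    (PySem.Set.add rc.1 p.1, true)
  else rc

-- 'while changed: changed = False; <one pass over graph.items()>'; the fuel (size+1) is only a
-- totality guard: the loop provably stabilises within that many passes
def pvLoop (items : List (String × List String)) : Nat → PySem.Set String → PySem.Set String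
  | 0, r => r
  | f + 1, r =>
      let rc := items.foldl pvPassStep (r, false)
      if rc.2 then pvLoop items f rc.1 else rc.1

def get_reachable_subgraph_alt (graph : List (String × List String)) (start : String) (end_ : String) : List String :=
  let g := PySem.Dict.ofList graph
  let forward := pvBFS (fun u => g.getD u []) (1 + (g.items.map (fun p => p.2.length)).sum) [start] PySem.Set.empty
  let reach := pvLoop g.items (g.size + 1) (PySem.Set.add PySem.Set.empty end_)
  forward.filter (fun n => PySem.Set.contains reach n)

-- ===== PRECONDITION & SPEC =====
def Spec_get_reachable_subgraph (graph : List (String × List String)) (start : String) (end_ : String) (out : List String) : Prop := out = get_reachable_subgraph_alt graph start end_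
instance (graph : List (String × List String)) (start : String) (end_ : String) (out : List String) : Decidable (Spec_get_reachable_subgraph graph start end_ out) := by unfold Spec_get_reachable_subgraph; infer_instance

-- ===== CLAIM (what is proved, stated in full; the proofs are below) =====
def Claim_equal_get_reachable_subgraph : Prop := ∀ (graph : List (String × List String)) (start : String) (end_ : String), Dom_get_reachable_subgraph graph start end_ → Spec_get_reachable_subgraph graph start end_ (get_reachable_subgraph graph start end_)

-- ===== LEMMAS AND PROOFS =====

-- 'u can reach e' along the graph's adjacency function
inductive pvReach (adj : String → List String) (e : String) : String → Prop
  | base : pvReach adj e e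
  | step : ∀ u v, v ∈ adj u → pvReach adj e v → pvReach adj e u

-- membership in the reverse graph's adjacency lists
theorem pvRev_inner_mem (k u v : String) :
    ∀ (l : List String) (d : PySem.Dict String (List String)),
      u ∈ (l.foldl (fun d nb => d.modify nb [] (fun t => t ++ [k])) d).getD v [] ↔
        u ∈ d.getD v [] ∨ (u = k ∧ v ∈ l) := by
  intro l
  induction l with
  | nil => simp
  | cons nb l ih =>
    intro d
    simp only [List.foldl_cons]
    rw [ih]
    simp only [PySem.Dict.modify, PySem.Dict.getD_insert]
    by_cases hv : v = nb <;> simp [hv] <;> tauto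

theorem pvRev_mem_aux (u v : String) :
    ∀ (items : List (String × List String)) (d : PySem.Dict String (List String)),
      u ∈ (items.foldl (fun d p => p.2.foldl (fun d nb => d.modify nb [] (fun l => l ++ [p.1])) d) d).getD v [] ↔
        u ∈ d.getD v [] ∨ ∃ l, (u, l) ∈ items ∧ v ∈ l := by
  intro items
  induction items with
  | nil => simp
  | cons p items ih =>
    intro d
    simp only [List.foldl_cons]
    rw [ih, pvRev_inner_mem]
    simp only [List.mem_cons, Prod.ext_iff]
    constructor
    · rintro ((h | ⟨rfl, hv⟩) | ⟨l, hl, hv⟩)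
      · exact Or.inl h
      · exact Or.inr ⟨p.2, Or.inl ⟨rfl, rfl⟩, hv⟩
      · exact Or.inr ⟨l, Or.inr hl, hv⟩
    · rintro (h | ⟨l, (⟨h1, h2⟩ | hl), hv⟩)
      · exact Or.inl (Or.inl h)
      · subst h1; subst h2; exact Or.inl (Or.inr ⟨rfl, hv⟩)
      · exact Or.inr ⟨l, hl, hv⟩

theorem pvRev_mem (u v : String) :
    ∀ (items : List (String × List String)),
      u ∈ (pvRev items).getD v [] ↔ ∃ l, (u, l) ∈ items ∧ v ∈ l := by
  intro items
  unfold pvRev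
  rw [pvRev_mem_aux]
  simp [PySem.Dict.getD_empty]

theorem pvRev_keys_nodup (items : List (String × List String)) : (pvRev items).keys.Nodup := by
  unfold pvRev
  generalize hd : (PySem.Dict.empty : PySem.Dict String (List String)) = d
  have hnd : d.keys.Nodup := by rw [← hd]; simp [PySem.Dict.keys, PySem.Dict.empty]
  clear hd
  induction items generalizing d with
  | nil => exact hnd
  | cons p items ih =>
    simp only [List.foldl_cons]
    apply ih
    exact PySem.Dict.nodup_keys_foldl_modify_key p.2 (fun x => x) [] (fun d x => (fun t => t ++ [p.1])) d hnd

theorem adj_mem_iff (g : PySem.Dict String (List String)) (hnd : g.keys.Nodup) (u v : String) :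
    v ∈ g.getD u [] ↔ ∃ l, (u, l) ∈ g.items ∧ v ∈ l := by
  constructor
  · intro hv
    cases h : g.get? u with
    | none => rw [PySem.Dict.getD_eq_get?_getD, h] at hv; simp at hv
    | some l =>
      refine ⟨l, PySem.Dict.mem_items_of_get?_eq_some (d := g) h, ?_⟩
      rwa [PySem.Dict.getD_eq_get?_getD, h] at hv
  · rintro ⟨l, hl, hv⟩
    rwa [PySem.Dict.getD_of_mem_items (d := g) (k := u) (v := l) hl hnd]

theorem pvBFS_sound (adj : String → List String) (G : String → Prop)
    (hstep : ∀ v u, G v → u ∈ adj v → G u) :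
    ∀ (f : Nat) (q vis : List String), (∀ x ∈ vis, G x) → (∀ x ∈ q, G x) →
      ∀ x ∈ pvBFS adj f q vis, G x := by
  intro f
  induction f with
  | zero => intro q vis hv hq; simpa [pvBFS] using hv
  | succ f ih =>
    intro q vis hv hq
    cases q with
    | nil => simpa [pvBFS] using hv
    | cons q qs =>
      simp only [pvBFS]
      split
      · exact ih qs vis hv (fun x hx => hq x (List.mem_cons_of_mem _ hx))
      · apply ih
        · intro x hx
          rcases (PySem.Set.mem_add _ _ _).mp hx with h | rfl
          · exact hv x h
          · exact hq x List.mem_cons_self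
        · intro x hx
          rcases List.mem_append.mp hx with h | h
          · exact hq x (List.mem_cons_of_mem _ h)
          · exact hstep q x (hq q List.mem_cons_self) h

theorem pvBFS_closure (adj : String → List String) (U : List String) (hU : U.Nodup)
    (hadj : ∀ u, u ∉ U → adj u = []) :
    ∀ (f : Nat) (q vis : List String),
      q.length + ((U.filter (fun u => !(PySem.Set.contains vis u))).map (fun u => (adj u).length)).sum ≤ f →
      (∀ x ∈ vis, x ∈ pvBFS adj f q vis) ∧ (∀ x ∈ q, x ∈ pvBFS adj f q vis) ∧
        (∀ v ∈ pvBFS adj f q vis, v ∉ vis → ∀ w ∈ adj v, w ∈ pvBFS adj f q vis) := by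
  intro f
  induction f with
  | zero =>
    intro q vis hm
    have hq : q = [] := List.eq_nil_of_length_eq_zero (by omega)
    subst hq
    refine ⟨fun x hx => by simpa [pvBFS] using hx, by simp, ?_⟩
    intro v hv hnv
    exact absurd (by simpa [pvBFS] using hv) hnv
  | succ f ih =>
    intro q vis hm
    cases q with
    | nil =>
      refine ⟨fun x hx => by simpa [pvBFS] using hx, by simp, ?_⟩
      intro v hv hnv
      exact absurd (by simpa [pvBFS] using hv) hnv
    | cons q qs =>
      cases hc : PySem.Set.contains vis q with
      | true =>
        have hqvis : q ∈ vis := by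
          simpa [PySem.Set.contains, List.contains_iff_mem] using hc
        have hm' : qs.length +
            ((U.filter (fun u => !(PySem.Set.contains vis u))).map (fun u => (adj u).length)).sum ≤ f := by
          simp only [List.length_cons] at hm; omega
        obtain ⟨h1, h2, h3⟩ := ih qs vis hm'
        simp only [pvBFS, hc, if_true]
        refine ⟨h1, ?_, h3⟩
        intro x hx
        rcases List.mem_cons.mp hx with rfl | hx
        · exact h1 x hqvis
        · exact h2 x hx
      | false =>
        have hqvis : q ∉ vis := by
          simp only [PySem.Set.contains] at hc
          simpa [List.contains_iff_mem] using hc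
        have hadd : PySem.Set.add vis q = vis ++ [q] := PySem.Set.add_of_not_mem hqvis
        -- the filtered list after visiting q
        have hfilter : U.filter (fun u => !(PySem.Set.contains (vis ++ [q]) u)) =
            (U.filter (fun u => !(PySem.Set.contains vis u))).filter (fun u => !(u == q)) := by
          rw [List.filter_filter]
          apply List.filter_congr
          intro x hx
          simp [PySem.Set.contains, List.mem_append, Bool.and_comm, Bool.beq_eq_decide_eq]
        set L := U.filter (fun u => !(PySem.Set.contains vis u)) with hL
        have hm' : (qs ++ adj q).length +
            ((U.filter (fun u => !(PySem.Set.contains (vis ++ [q]) u))).map (fun u => (adj u).length)).sum ≤ f := by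
          rw [hfilter]
          by_cases hqU : q ∈ U
          · have hqL : q ∈ L := by
              rw [hL]
              refine List.mem_filter.mpr ⟨hqU, ?_⟩
              simpa [PySem.Set.contains, List.contains_iff_mem] using hqvis
            have hLnd : L.Nodup := hU.filter _
            have hperm : List.Perm L (q :: L.erase q) := List.perm_cons_erase hqL
            have herase : L.erase q = L.filter (fun u => !(u == q)) := by
              rw [hLnd.erase_eq_filter]
              apply List.filter_congr
              intro x hx
              simp [bne, Bool.beq_eq_decide_eq]
            have hsum : (L.map (fun u => (adj u).length)).sum =
                (adj q).length + ((L.filter (fun u => !(u == q))).map (fun u => (adj u).length)).sum := by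
              rw [← herase]
              have := (hperm.map (fun u => (adj u).length)).sum_eq
              simpa using this
            simp only [List.length_cons, List.length_append] at hm ⊢
            omega
          · have hadjq : adj q = [] := hadj q hqU
            have hid : L.filter (fun u => !(u == q)) = L := by
              apply List.filter_eq_self.mpr
              intro x hx
              have hxU : x ∈ U := (List.mem_filter.mp hx).1
              simp only [Bool.not_eq_eq_eq_not, Bool.not_true, beq_eq_false_iff_ne]
              rintro rfl; exact hqU hxU
            rw [hid]
            simp only [List.length_cons, List.length_append, hadjq, List.length_nil] at hm ⊢
            omega
        obtain ⟨h1, h2, h3⟩ := ih (qs ++ adj q) (vis ++ [q]) hm'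
        simp only [pvBFS, hc, if_false, Bool.false_eq_true, hadd]
        refine ⟨?_, ?_, ?_⟩
        · intro x hx; exact h1 x (List.mem_append_left _ hx)
        · intro x hx
          rcases List.mem_cons.mp hx with rfl | hx
          · exact h1 x (List.mem_append_right _ (List.mem_singleton.mpr rfl))
          · exact h2 x (List.mem_append_left _ hx)
        · intro v hv hnv w hw
          by_cases hvq : v = q
          · subst hvq
            exact h2 w (List.mem_append_right _ hw)
          · apply h3 v hv ?_ w hw
            simp only [List.mem_append, List.mem_singleton]
            rintro (h | h)
            · exact hnv h
            · exact hvq h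

theorem pvPass_shape :
    ∀ (l : List (String × List String)) (r : PySem.Set String) (b : Bool),
      ∃ Δ, (l.foldl pvPassStep (r, b)).1 = r ++ Δ ∧
        (l.foldl pvPassStep (r, b)).2 = (b || !Δ.isEmpty) ∧
        (∀ x ∈ Δ, x ∈ l.map Prod.fst ∧ x ∉ r) ∧
        (r.Nodup → (r ++ Δ).Nodup) := by
  intro l
  induction l with
  | nil => intro r b; exact ⟨[], by simp⟩
  | cons p l ih =>
    intro r b
    simp only [List.foldl_cons]
    cases hc : !(PySem.Set.contains r p.1) && p.2.any (fun nb => PySem.Set.contains r nb) with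
    | false =>
      have hstep : pvPassStep (r, b) p = (r, b) := by
        simp only [pvPassStep]
        simp only [hc]
        simp
      rw [hstep]
      obtain ⟨Δ, h1, h2, h3, h4⟩ := ih r b
      exact ⟨Δ, h1, h2, fun x hx => ⟨List.mem_cons_of_mem _ (h3 x hx).1, (h3 x hx).2⟩, h4⟩
    | true =>
      have hp1 : p.1 ∉ r := by
        have := (Bool.and_eq_true _ _).mp hc |>.1
        simpa [PySem.Set.contains, List.contains_iff_mem] using this
      have hadd : PySem.Set.add r p.1 = r ++ [p.1] := PySem.Set.add_of_not_mem hp1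
      have hstep : pvPassStep (r, b) p = (r ++ [p.1], true) := by
        simp only [pvPassStep]
        simp only [hc]
        simp [hadd]
      rw [hstep]
      obtain ⟨Δ, h1, h2, h3, h4⟩ := ih (r ++ [p.1]) true
      refine ⟨p.1 :: Δ, ?_, ?_, ?_, ?_⟩
      · rw [h1]; simp
      · rw [h2]; simp
      · intro x hx
        rcases List.mem_cons.mp hx with rfl | hx
        · exact ⟨List.mem_cons_self, hp1⟩
        · refine ⟨List.mem_cons_of_mem _ (h3 x hx).1, fun hxr => (h3 x hx).2 (List.mem_append_left _ hxr)⟩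
      · intro hnd
        have : (r ++ [p.1]).Nodup := by
          simp only [List.nodup_append, List.nodup_cons, List.nodup_nil, and_true, true_and]
          refine ⟨hnd, by simp, ?_⟩
          intro a ha c hc'
          simp only [List.mem_singleton] at hc'
          subst hc'
          rintro rfl
          exact hp1 ha
        have h := h4 this
        simpa using h

theorem pvPass_stable :
    ∀ (l : List (String × List String)) (r : PySem.Set String),
      (l.foldl pvPassStep (r, false)).2 = false →
      ∀ p ∈ l, p.1 ∈ r ∨ ∀ w ∈ p.2, w ∉ r := by
  intro l
  induction l with
  | nil => simp
  | cons p l ih =>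
    intro r h
    simp only [List.foldl_cons] at h
    cases hc : !(PySem.Set.contains r p.1) && p.2.any (fun nb => PySem.Set.contains r nb) with
    | true =>
      exfalso
      have hstep : pvPassStep (r, false) p = (PySem.Set.add r p.1, true) := by
        simp only [pvPassStep]
        simp only [hc]
        simp
      rw [hstep] at h
      obtain ⟨Δ, -, h2, -, -⟩ := pvPass_shape l (PySem.Set.add r p.1) true
      rw [h2] at h
      simp at h
    | false =>
      have hstep : pvPassStep (r, false) p = (r, false) := by
        simp only [pvPassStep]
        simp only [hc]
        simp
      rw [hstep] at h
      intro p' hp'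
      rcases List.mem_cons.mp hp' with rfl | hp'
      · rcases Bool.and_eq_false_iff.mp hc with h1 | h2
        · left
          simpa [PySem.Set.contains, List.contains_iff_mem] using h1
        · right
          intro w hw hwr
          have : p'.2.any (fun nb => PySem.Set.contains r nb) = true :=
            List.any_eq_true.mpr ⟨w, hw, by simpa [PySem.Set.contains, List.contains_iff_mem] using hwr⟩
          rw [this] at h2; exact absurd h2 (by simp)
      · exact ih r h p' hp'

theorem pvPass_sound (G : String → Prop) :
    ∀ (l : List (String × List String)) (r : PySem.Set String) (b : Bool),
      (∀ p ∈ l, ∀ w ∈ p.2, G w → G p.1) → (∀ x ∈ r, G x) →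
      ∀ x ∈ (l.foldl pvPassStep (r, b)).1, G x := by
  intro l
  induction l with
  | nil => intro r b _ hr; simpa using hr
  | cons p l ih =>
    intro r b hl hr
    simp only [List.foldl_cons]
    cases hc : !(PySem.Set.contains r p.1) && p.2.any (fun nb => PySem.Set.contains r nb) with
    | false =>
      have hstep : pvPassStep (r, b) p = (r, b) := by
        simp only [pvPassStep]; simp only [hc]; simp
      rw [hstep]
      exact ih r b (fun p' hp' => hl p' (List.mem_cons_of_mem _ hp')) hr
    | true =>
      have hany := (Bool.and_eq_true _ _).mp hc |>.2
      obtain ⟨w, hw, hwr⟩ := List.any_eq_true.mp hany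
      have hGw : G w := hr w (by simpa [PySem.Set.contains, List.contains_iff_mem] using hwr)
      have hGp : G p.1 := hl p List.mem_cons_self w hw hGw
      have hstep : pvPassStep (r, b) p = (PySem.Set.add r p.1, true) := by
        simp only [pvPassStep]; simp only [hc]; simp
      rw [hstep]
      apply ih (PySem.Set.add r p.1) true (fun p' hp' => hl p' (List.mem_cons_of_mem _ hp'))
      intro x hx
      rcases (PySem.Set.mem_add _ _ _).mp hx with h | rfl
      · exact hr x h
      · exact hGp

theorem pvLoop_mono (items : List (String × List String)) :
    ∀ (f : Nat) (r : PySem.Set String) (x : String), x ∈ r → x ∈ pvLoop items f r := by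
  intro f
  induction f with
  | zero => intro r x hx; simpa [pvLoop] using hx
  | succ f ih =>
    intro r x hx
    obtain ⟨Δ, h1, -, -, -⟩ := pvPass_shape items r false
    have hx' : x ∈ (items.foldl pvPassStep (r, false)).1 := by
      rw [h1]; exact List.mem_append_left _ hx
    simp only [pvLoop]
    split
    · exact ih _ x hx'
    · exact hx'

theorem pvLoop_sound (items : List (String × List String)) (G : String → Prop)
    (hitems : ∀ p ∈ items, ∀ w ∈ p.2, G w → G p.1) :
    ∀ (f : Nat) (r : PySem.Set String), (∀ x ∈ r, G x) → ∀ x ∈ pvLoop items f r, G x := by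
  intro f
  induction f with
  | zero => intro r hr x hx; exact hr x (by simpa [pvLoop] using hx)
  | succ f ih =>
    intro r hr x hx
    have hpass := pvPass_sound G items r false hitems hr
    simp only [pvLoop] at hx
    split at hx
    · exact ih _ hpass x hx
    · exact hpass x hx

theorem pvLoop_stable (items : List (String × List String)) (A : List String)
    (hkeys : ∀ x ∈ items.map Prod.fst, x ∈ A) :
    ∀ (f : Nat) (r : PySem.Set String), r.Nodup → (∀ x ∈ r, x ∈ A) →
      A.length + 1 - r.length ≤ f →
      (items.foldl pvPassStep (pvLoop items f r, false)).2 = false := by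
  intro f
  induction f with
  | zero =>
    intro r hnd hsub hf
    exfalso
    have hlen : r.length ≤ A.length := (List.subperm_of_subset hnd hsub).length_le
    omega
  | succ f ih =>
    intro r hnd hsub hf
    obtain ⟨Δ, h1, h2, h3, h4⟩ := pvPass_shape items r false
    simp only [pvLoop]
    cases hc : (items.foldl pvPassStep (r, false)).2 with
    | false =>
      simp only [hc, if_false, Bool.false_eq_true]
      have hΔ : Δ = [] := by
        rw [h2] at hc
        simpa using hc
      rw [h1, hΔ, List.append_nil]
      exact hc
    | true =>
      simp only [hc, if_true]
      have hΔ : Δ ≠ [] := by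
        rw [h2] at hc
        simp only [Bool.false_or] at hc
        simpa [List.isEmpty_iff] using hc
      apply ih
      · rw [h1]; exact h4 hnd
      · rw [h1]
        intro x hx
        rcases List.mem_append.mp hx with h | h
        · exact hsub x h
        · exact hkeys x (h3 x h).1
      · rw [h1]
        have : 1 ≤ Δ.length := by
          cases Δ with
          | nil => exact absurd rfl hΔ
          | cons a l => simp
        simp only [List.length_append]
        omega

theorem mem_backward_iff (g : PySem.Dict String (List String)) (hnd : g.keys.Nodup) (e x : String) :
    x ∈ pvBFS (fun u => (pvRev g.items).getD u []) (1 + ((pvRev g.items).values.map List.length).sum)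
        [e] PySem.Set.empty ↔ pvReach (fun u => g.getD u []) e x := by
  constructor
  · apply pvBFS_sound _ (pvReach (fun u => g.getD u []) e)
    · intro v u hG hu
      have hv : v ∈ g.getD u [] := by
        rw [adj_mem_iff g hnd]
        exact (pvRev_mem u v g.items).mp hu
      exact pvReach.step u v hv hG
    · intro y hy; simp [PySem.Set.empty] at hy
    · intro y hy
      simp only [List.mem_singleton] at hy
      subst hy; exact pvReach.base
  · intro hr
    have hadjU : ∀ u, u ∉ (pvRev g.items).keys → (pvRev g.items).getD u [] = [] := by
      intro u hu
      apply PySem.Dict.getD_of_not_contains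
      cases hcu : (pvRev g.items).contains u with
      | false => rfl
      | true => exact absurd ((PySem.Dict.contains_iff_mem_keys _ _).mp hcu) hu
    have hfuel : ([e] : List String).length +
        (((pvRev g.items).keys.filter (fun u => !(PySem.Set.contains PySem.Set.empty u))).map
          (fun u => ((pvRev g.items).getD u []).length)).sum ≤
        1 + ((pvRev g.items).values.map List.length).sum := by
      have h1 : ((pvRev g.items).keys.filter (fun u => !(PySem.Set.contains PySem.Set.empty u))) =
          (pvRev g.items).keys := by
        apply List.filter_eq_self.mpr
        intro a _
        simp [PySem.Set.contains, PySem.Set.empty]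
      rw [h1]
      have h2 : (pvRev g.items).values = (pvRev g.items).keys.map (fun k => (pvRev g.items).getD k []) :=
        PySem.Dict.values_eq_map_keys _ (pvRev_keys_nodup g.items) []
      rw [h2, List.map_map]
      simp [Function.comp_def]
    obtain ⟨-, h2, h3⟩ := pvBFS_closure (fun u => (pvRev g.items).getD u []) (pvRev g.items).keys
      (pvRev_keys_nodup g.items) hadjU _ [e] PySem.Set.empty hfuel
    induction hr with
    | base => exact h2 e List.mem_cons_self
    | step u v hv hrv ih =>
      have hu : u ∈ (pvRev g.items).getD v [] := by
        rw [pvRev_mem]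
        exact (adj_mem_iff g hnd u v).mp hv
      exact h3 v ih (by simp [PySem.Set.empty]) u hu

theorem mem_reach_iff (g : PySem.Dict String (List String)) (hnd : g.keys.Nodup) (e x : String) :
    x ∈ pvLoop g.items (g.size + 1) (PySem.Set.add PySem.Set.empty e) ↔
      pvReach (fun u => g.getD u []) e x := by
  have hitems : ∀ p ∈ g.items, ∀ w ∈ p.2, pvReach (fun u => g.getD u []) e w →
      pvReach (fun u => g.getD u []) e p.1 := by
    intro p hp w hw hrw
    have : w ∈ g.getD p.1 [] := (adj_mem_iff g hnd p.1 w).mpr ⟨p.2, by simpa using hp, hw⟩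
    exact pvReach.step p.1 w this hrw
  have hr0 : PySem.Set.add PySem.Set.empty e = [e] := by
    simp [PySem.Set.add, PySem.Set.empty, PySem.Set.contains]
  constructor
  · apply pvLoop_sound g.items _ hitems
    intro y hy
    rw [hr0] at hy
    simp only [List.mem_singleton] at hy
    subst hy; exact pvReach.base
  · intro hr
    set A : List String := PySem.List.dedup (e :: g.keys) with hA
    have hkeys : ∀ y ∈ g.items.map Prod.fst, y ∈ A := by
      intro y hy
      rw [hA, PySem.List.dedup_eq_ofList]
      exact (PySem.Set.mem_ofList _ _).mpr (List.mem_cons_of_mem _ hy)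
    have hstab := pvLoop_stable g.items A hkeys (g.size + 1) (PySem.Set.add PySem.Set.empty e)
      (by rw [hr0]; simp)
      (by
        rw [hr0]
        intro y hy
        simp only [List.mem_singleton] at hy
        subst hy
        rw [hA, PySem.List.dedup_eq_ofList]
        exact (PySem.Set.mem_ofList _ _).mpr List.mem_cons_self)
      (by
        have h1 : A.length ≤ (e :: g.keys).length := by
          rw [hA, PySem.List.dedup_eq_ofList]
          exact PySem.Set.length_ofList_le _
        have h2 : g.keys.length = g.size := by
          simp [PySem.Dict.keys, PySem.Dict.size]
        simp only [List.length_cons] at h1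
        rw [hr0]
        simp only [List.length_singleton]
        omega)
    have hstable := pvPass_stable g.items _ hstab
    have hmem_e : e ∈ pvLoop g.items (g.size + 1) (PySem.Set.add PySem.Set.empty e) :=
      pvLoop_mono g.items _ _ e (by rw [hr0]; exact List.mem_cons_self)
    induction hr with
    | base => exact hmem_e
    | step u v hv hrv ih =>
      obtain ⟨l, hl, hvl⟩ := (adj_mem_iff g hnd u v).mp hv
      rcases hstable (u, l) hl with h | h
      · exact h
      · exact absurd ih (h v hvl)

-- ===== VERDICT (by name: the statement is the Claim_ definition above) =====
theorem get_reachable_subgraph_spec : Claim_equal_get_reachable_subgraph := by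
  intro graph start end_ _
  unfold Spec_get_reachable_subgraph get_reachable_subgraph get_reachable_subgraph_alt
  simp only [PySem.Set.inter]
  apply List.filter_congr
  intro x _
  have hnd := PySem.Dict.nodup_keys_ofList (ps := graph)
  have h1 := mem_backward_iff (PySem.Dict.ofList graph) hnd end_ x
  have h2 := mem_reach_iff (PySem.Dict.ofList graph) hnd end_ x
  apply Bool.coe_iff_coe.mp
  simp only [PySem.Set.contains, List.contains_iff_mem]
  rw [h1, h2]
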